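-- pv_equiv track=rewrite | github.com/seizethedayunhui/codetree-algorithm | 250417/2개 이상의 알파벳/more-than-one-alphabet.py | same_cnt
-- ===== SOURCE A (Python) =====
-- def same_cnt(A) :
--
--     cnt_arr = []
--
--     for elem in A :
--         flag= True
--         for i in range(len(cnt_arr)) :
--             if cnt_arr[i] == elem :
--                 flag = False
--                 break
--         if flag :
--             cnt_arr.append(elem)
--
--     if len(cnt_arr) >1 :
--         return True
--     return False
-- ===== SOURCE B (Python) =====
-- def same_cnt(A):
--     it = iter(A)
--     try:
--         first = next(it)
--     except StopIteration:
--         return False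
--     for x in it:
--         if x != first:
--             return True
--     return False
-- ===== Notes on version B (the rewrite author's own statement) =====
-- stated objective: simpler
-- what changed: Replaces the dedup-list build (quadratic membership scan, then length>1 test) with a single early-exit pass comparing every later element to the first.
import Mathlib
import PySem

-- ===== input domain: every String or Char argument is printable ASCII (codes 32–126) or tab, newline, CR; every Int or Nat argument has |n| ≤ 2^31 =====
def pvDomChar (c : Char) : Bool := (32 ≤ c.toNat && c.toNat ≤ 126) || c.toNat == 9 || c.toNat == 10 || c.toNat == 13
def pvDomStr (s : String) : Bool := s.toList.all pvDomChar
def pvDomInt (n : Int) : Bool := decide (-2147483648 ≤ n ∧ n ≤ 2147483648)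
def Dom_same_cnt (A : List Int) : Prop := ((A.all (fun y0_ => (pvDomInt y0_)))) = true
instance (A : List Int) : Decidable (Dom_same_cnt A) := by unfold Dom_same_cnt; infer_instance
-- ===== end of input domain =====

-- B replaces A's dedup-list build with a single early-exit pass comparing each later element to the first (simpler, linear).

-- ===== PORT A =====
-- inner loop: for i in range(len(cnt_arr)): if cnt_arr[i] == elem: flag = False; break
-- (a linear scan of cnt_arr with break, transliterated as structural recursion over cnt_arr)
def same_cnt_flag (cnt : List Int) (elem : Int) : Bool :=
  match cnt with
  | [] => true
  | c :: cs => if c == elem then false else same_cnt_flag cs elem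

def same_cnt (A : List Int) : Bool :=
  let cnt_arr := A.foldl (fun cnt_arr elem =>
    if same_cnt_flag cnt_arr elem then cnt_arr ++ [elem] else cnt_arr) []
  if cnt_arr.length > 1 then true else false

-- ===== PORT B =====
-- for x in it: if x != first: return True  (early-exit scan of the tail)
def same_cnt_alt_scan (first : Int) (it : List Int) : Bool :=
  match it with
  | [] => false
  | x :: xs => if x != first then true else same_cnt_alt_scan first xs

def same_cnt_alt (A : List Int) : Bool :=
  match A with
  | [] => false
  | first :: it => same_cnt_alt_scan first it

-- ===== PRECONDITION & SPEC =====
def Spec_same_cnt (A : List Int) (out : Bool) : Prop := out = same_cnt_alt A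
instance (A : List Int) (out : Bool) : Decidable (Spec_same_cnt A out) := by unfold Spec_same_cnt; infer_instance

-- ===== CLAIM (what is proved, stated in full; the proofs are below) =====
def Claim_equal_same_cnt : Prop := ∀ (A : List Int), Dom_same_cnt A → Spec_same_cnt A (same_cnt A)

-- ===== LEMMAS AND PROOFS =====

theorem flag_eq_not_mem (cnt : List Int) (elem : Int) :
    same_cnt_flag cnt elem = !cnt.contains elem := by
  induction cnt with
  | nil => rfl
  | cons c cs ih =>
    simp only [same_cnt_flag, List.contains_cons]
    by_cases h : c == elem <;> by_cases h2 : elem == c <;>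
      simp_all [BEq.comm]

theorem scan_eq_any (first : Int) (it : List Int) :
    same_cnt_alt_scan first it = it.any (fun x => x != first) := by
  induction it with
  | nil => rfl
  | cons x xs ih =>
    simp only [same_cnt_alt_scan, List.any_cons]
    by_cases h : x != first <;> simp_all

theorem fold_len (xs cnt : List Int) (h : cnt ≠ []) :
    (1 < (xs.foldl (fun cnt_arr elem =>
      if same_cnt_flag cnt_arr elem then cnt_arr ++ [elem] else cnt_arr) cnt).length)
    ↔ (1 < cnt.length ∨ ∃ e ∈ xs, e ∉ cnt) := by
  induction xs generalizing cnt with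
  | nil => simp
  | cons e rest ih =>
    rw [List.foldl_cons]
    by_cases hm : e ∈ cnt
    · have hf : same_cnt_flag cnt e = false := by
        rw [flag_eq_not_mem]; simp [hm]
      rw [hf]
      simp only [Bool.false_eq_true, if_false]
      rw [ih cnt h]
      constructor
      · rintro (h1 | ⟨x, hx, hnx⟩)
        · exact Or.inl h1
        · exact Or.inr ⟨x, List.mem_cons_of_mem _ hx, hnx⟩
      · rintro (h1 | ⟨x, hx, hnx⟩)
        · exact Or.inl h1
        · rcases List.mem_cons.1 hx with rfl | hx'
          · exact absurd hm hnx
          · exact Or.inr ⟨x, hx', hnx⟩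
    · have hf : same_cnt_flag cnt e = true := by
        rw [flag_eq_not_mem]; simp [hm]
      rw [hf, if_pos rfl]
      rw [ih (cnt ++ [e]) (by simp)]
      have hlen : 1 < (cnt ++ [e]).length := by
        have : 1 ≤ cnt.length := List.length_pos_iff.2 h
        simp [List.length_append]; omega
      constructor
      · intro _; exact Or.inr ⟨e, List.mem_cons_self, hm⟩
      · intro _; exact Or.inl hlen

theorem same_cnt_eq_alt (A : List Int) : same_cnt A = same_cnt_alt A := by
  cases A with
  | nil => rfl
  | cons first it =>
    have h0 : same_cnt_flag [] first = true := rfl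
    simp only [same_cnt, same_cnt_alt, List.foldl_cons, h0, reduceIte,
      List.nil_append, scan_eq_any, gt_iff_lt]
    have key := fold_len it [first] (by simp)
    by_cases h : 1 < (it.foldl (fun cnt_arr elem =>
        if same_cnt_flag cnt_arr elem then cnt_arr ++ [elem] else cnt_arr) [first]).length
    · rw [if_pos h]
      rcases (key.1 h) with h1 | ⟨e, he, hne⟩
      · simp at h1
      · exact (List.any_eq_true.2 ⟨e, he, by simpa using hne⟩).symm
    · rw [if_neg h]
      by_contra hany
      have hany' : it.any (fun x => x != first) = true := by
        cases hh : it.any (fun x => x != first) <;> simp_all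
      rcases List.any_eq_true.1 hany' with ⟨e, he, hne⟩
      exact h (key.2 (Or.inr ⟨e, he, by simpa using hne⟩))

-- ===== VERDICT (by name: the statement is the Claim_ definition above) =====
theorem same_cnt_spec : Claim_equal_same_cnt := by
  intro A _
  unfold Spec_same_cnt
  exact same_cnt_eq_alt A
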